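-- pv_equiv track=rewrite | github.com/rslinford/Advent_of_Code_2022 | Day_22.py | parse_puzzle_input
-- ===== SOURCE A (Python) =====
-- def parse_puzzle_input(data):
--     matrix = list()
--     directions = ''
--     end_of_matrix_reached = False
--     for line in data:
--         if end_of_matrix_reached:
--             directions = line
--         if len(line) > 0 and not end_of_matrix_reached:
--             matrix.append(line)
--         elif len(line) == 0:
--             end_of_matrix_reached = True
--     return matrix, directions
-- ===== SOURCE B (Python) =====
-- def parse_puzzle_input(data):
--     lines = list(data)
--     if '' in lines:
--         i = lines.index('')
--         return lines[:i], lines[-1]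
--     return lines, ''
-- ===== Notes on version B (the rewrite author's own statement) =====
-- stated objective: simpler
-- what changed: Replaces the stateful single pass with an end_of_matrix_reached flag by a locate-the-first-blank-line-then-slice decomposition: matrix = lines before the first blank, directions = the last line (which is '' when the blank is last or absent).
import Mathlib
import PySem

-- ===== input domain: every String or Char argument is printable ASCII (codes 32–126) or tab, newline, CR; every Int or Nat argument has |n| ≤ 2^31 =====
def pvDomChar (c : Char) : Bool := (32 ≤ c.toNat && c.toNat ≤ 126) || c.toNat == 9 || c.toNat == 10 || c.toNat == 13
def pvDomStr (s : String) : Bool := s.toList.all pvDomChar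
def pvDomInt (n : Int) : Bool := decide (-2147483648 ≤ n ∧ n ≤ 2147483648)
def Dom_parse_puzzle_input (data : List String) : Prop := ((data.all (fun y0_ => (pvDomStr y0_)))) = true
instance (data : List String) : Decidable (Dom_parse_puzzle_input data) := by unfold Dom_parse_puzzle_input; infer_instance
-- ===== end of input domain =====

-- B replaces A's stateful single pass (end_of_matrix_reached flag) by locating the first
-- blank line and slicing: matrix = lines before it, directions = the last line. (objective: simpler)

-- ===== PORT A =====
-- one fold step of A's for-loop over state (matrix, directions, end_of_matrix_reached)
def pvStepA (st : List String × String × Bool) (line : String) : List String × String × Bool :=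
  let matrix := st.1
  let eom := st.2.2
  let directions := if eom then line else st.2.1
  if 0 < PySem.Str.len line ∧ eom = false then (matrix ++ [line], directions, eom)
  else if PySem.Str.len line = 0 then (matrix, directions, true)
  else (matrix, directions, eom)

def parse_puzzle_input (data : List String) : List String × String :=
  let st := data.foldl pvStepA ([], "", false)
  (st.1, st.2.1)

-- ===== PORT B =====
def parse_puzzle_input_alt (data : List String) : List String × String :=
  let lines := data
  if "" ∈ lines then
    let i := (PySem.List.index? lines "").getD 0
    (PySem.List.slice lines none (some (i : Int)), (PySem.List.pyGet? lines (-1)).getD "")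
  else (lines, "")

-- ===== PRECONDITION & SPEC =====
def Spec_parse_puzzle_input (data : List String) (out : List String × String) : Prop := out = parse_puzzle_input_alt data
instance (data : List String) (out : List String × String) : Decidable (Spec_parse_puzzle_input data out) := by unfold Spec_parse_puzzle_input; infer_instance

-- ===== CLAIM (what is proved, stated in full; the proofs are below) =====
def Claim_equal_parse_puzzle_input : Prop := ∀ (data : List String), Dom_parse_puzzle_input data → Spec_parse_puzzle_input data (parse_puzzle_input data)

-- ===== LEMMAS AND PROOFS =====

theorem pvLen_zero_iff (s : String) : PySem.Str.len s = 0 ↔ s = "" := by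
  simp [PySem.Str.len_eq, String.length_eq_zero_iff]

-- once the flag is true, each line just overwrites directions
theorem pvFoldA_true (rest : List String) (m : List String) (d : String) :
    rest.foldl pvStepA (m, d, true) = (m, rest.getLastD d, true) := by
  induction rest generalizing d with
  | nil => simp
  | cons l rest ih =>
    have hstep : pvStepA (m, d, true) l = (m, l, true) := by
      simp only [pvStepA]
      by_cases h : PySem.Str.len l = 0 <;> simp_all
    rw [List.foldl_cons, hstep, ih, List.getLastD_cons]

-- while no blank line has been seen, each line is appended to matrix
theorem pvFoldA_noBlank (pre : List String) (h : "" ∉ pre) (m : List String) (d : String) :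
    pre.foldl pvStepA (m, d, false) = (m ++ pre, d, false) := by
  induction pre generalizing m with
  | nil => simp
  | cons l pre ih =>
    have hl : l ≠ "" := fun he => h (he ▸ List.mem_cons_self ..)
    have hlen : 0 < PySem.Str.len l := by
      have h0 : PySem.Str.len l ≠ 0 := fun he => hl ((pvLen_zero_iff l).mp he)
      have hnn : 0 ≤ PySem.Str.len l := by rw [PySem.Str.len_eq]; positivity
      exact lt_of_le_of_ne hnn (Ne.symm h0)
    have hstep : pvStepA (m, d, false) l = (m ++ [l], d, false) := by
      simp only [pvStepA]
      rw [if_pos ⟨hlen, trivial⟩]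
      simp
    have h' : "" ∉ pre := fun hp => h (List.mem_cons_of_mem _ hp)
    simp [List.foldl_cons, hstep, ih h']

theorem pvIndex_split (pre rest : List String) (h : "" ∉ pre) :
    PySem.List.index? (pre ++ "" :: rest) "" = some pre.length := by
  induction pre with
  | nil =>
    rw [List.nil_append, PySem.List.index?_cons_self]
    rfl
  | cons l pre ih =>
    have hl : l ≠ "" := fun he => h (he ▸ List.mem_cons_self ..)
    have h' : "" ∉ pre := fun hp => h (List.mem_cons_of_mem _ hp)
    rw [List.cons_append, PySem.List.index?_cons_of_ne _ hl, ih h']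
    rfl

theorem pvGetLast?_cons_eq (x : String) (rest : List String) :
    (x :: rest).getLast? = some (rest.getLastD x) := by
  induction rest generalizing x with
  | nil => rfl
  | cons y rest ih => rw [List.getLast?_cons_cons, ih, List.getLastD_cons]

theorem pvSplit_of_mem (data : List String) (h : "" ∈ data) :
    ∃ pre rest, data = pre ++ "" :: rest ∧ "" ∉ pre := by
  induction data with
  | nil => cases h
  | cons l data ih =>
    by_cases hl : l = ""
    · exact ⟨[], data, by simp [hl], by simp⟩
    · have hd : "" ∈ data := by
        rcases List.mem_cons.mp h with h1 | h1
        · exact absurd h1.symm hl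
        · exact h1
      rcases ih hd with ⟨pre, rest, heq, hmem⟩
      refine ⟨l :: pre, rest, by simp [heq], ?_⟩
      intro hc
      rcases List.mem_cons.mp hc with h1 | h1
      · exact hl h1.symm
      · exact hmem h1

-- ===== VERDICT (by name: the statement is the Claim_ definition above) =====
theorem parse_puzzle_input_spec : Claim_equal_parse_puzzle_input := by
  intro data _
  unfold Spec_parse_puzzle_input parse_puzzle_input parse_puzzle_input_alt
  by_cases hmem : "" ∈ data
  · rcases pvSplit_of_mem data hmem with ⟨pre, rest, heq, hpre⟩
    subst heq
    rw [if_pos hmem]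
    -- A side
    have hblank : pvStepA (pre, "", false) "" = (pre, "", true) := by
      simp [pvStepA]
    rw [List.foldl_append, pvFoldA_noBlank pre hpre [] "", List.foldl_cons, List.nil_append,
      hblank, pvFoldA_true]
    -- B side
    rw [pvIndex_split pre rest hpre]
    simp only [Option.getD_some, PySem.List.slice_to_natCast, PySem.List.pyGet?_neg_one,
      List.take_left]
    rw [List.getLast?_append, pvGetLast?_cons_eq]
    simp
  · rw [if_neg hmem]
    have : "" ∉ data := hmem
    rw [pvFoldA_noBlank data this [] ""]
    simp
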